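-- pv_equiv track=rewrite | github.com/ashwinnellimuttath/Algorithms-Coursework-UCR | 4assignment/challenge/5dog.py | compute_array_A
-- ===== SOURCE A (Python) =====
-- def compute_ranks(S):
--     # Sort the sequence S and get the ranks
--     # sorted_S = sorted(S)
--     # ranks = [sorted_S.index(x) + 1 for x in S]  # Adding 1 to make ranks 1-based
--
--     p = [(S[i], i) for i in range(len(S))]
--     p.sort(key=lambda x: (x[0], -x[1]))
--     indices = {}
--
--     # Populate the dictionary with the indices
--     for i, (x, _) in enumerate(p):
--         if x not in indices:
--             indices[x] = i
--
--     # Get the ranks based on the dictionary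
--     ranks = [indices[x] + 1 for x in S]
--
--     return ranks
--
-- class SegmentTreeNode:
--     def __init__(self, start, end):
--         self.start = start
--         self.end = end
--         self.max_value = 0
--         self.left = None
--         self.right = None
--
-- def build_segment_tree(nums, start, end):
--     if start > end:
--         return None
--
--     root = SegmentTreeNode(start, end)
--
--     if start == end:
--         root.max_value = nums[start]
--         return root
--
--     mid = (start + end) // 2
--     root.left = build_segment_tree(nums, start, mid)
--     root.right = build_segment_tree(nums, mid + 1, end)
--     root.max_value = max(root.left.max_value, root.right.max_value)
--
--     return root
--
-- def update_segment_tree(root, index, value):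
--     if root is None or index < root.start or index > root.end:
--         return
--
--     if root.start == root.end == index:
--         root.max_value = value
--         return
--
--     mid = (root.start + root.end) // 2
--     if index <= mid:
--         update_segment_tree(root.left, index, value)
--     else:
--         update_segment_tree(root.right, index, value)
--
--     root.max_value = max(root.left.max_value, root.right.max_value)
--
-- def query_segment_tree(root, start, end):
--     if root is None or end < root.start or start > root.end:
--         return 0
--
--     if start <= root.start and end >= root.end:
--         return root.max_value
--
--     return max(query_segment_tree(root.left, start, end), query_segment_tree(root.right, start, end))
--
-- def compute_array_A(S):
--     n = len(S)
--     ranks = compute_ranks(S)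
--
--     # Build the segment tree with initial values of 0
--     segment_tree = build_segment_tree([0] * n, 0, n - 1)
--
--     A = [0] * n
--     for i in range(n):
--         rank_i = ranks[i]
--         A[rank_i - 1] = S[i] * (n - i) + query_segment_tree(segment_tree, 0, rank_i - 1)
--
--         # Update the segment tree with the new value
--         update_segment_tree(segment_tree, rank_i - 1, A[rank_i - 1])
--
--     return A, ranks
-- ===== SOURCE B (Python) =====
-- # B: prefix-max DP over a plain list instead of A's segment tree; the best value over
-- # lower ranks is max(0, max(A[:r])) — 0 being the base when no lower rank is set yet.
-- def compute_ranks(S):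
--     p = [(S[i], i) for i in range(len(S))]
--     p.sort(key=lambda x: (x[0], -x[1]))
--     indices = {}
--     for i, (x, _) in enumerate(p):
--         if x not in indices:
--             indices[x] = i
--     ranks = [indices[x] + 1 for x in S]
--     return ranks
--
-- def compute_array_A(S):
--     n = len(S)
--     ranks = compute_ranks(S)
--     A = [0] * n
--     for i, r in enumerate(ranks):
--         A[r - 1] = S[i] * (n - i) + max(0, max(A[:r]))
--     return A, ranks
-- ===== Notes on version B (the rewrite author's own statement) =====
-- stated objective: simpler
-- what changed: Replaced the entire segment-tree (node class, build/update/query recursion) with a plain array and a direct prefix-max scan max(0, max(A[:r])) per step; compute_ranks is kept verbatim.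
import Mathlib
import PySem

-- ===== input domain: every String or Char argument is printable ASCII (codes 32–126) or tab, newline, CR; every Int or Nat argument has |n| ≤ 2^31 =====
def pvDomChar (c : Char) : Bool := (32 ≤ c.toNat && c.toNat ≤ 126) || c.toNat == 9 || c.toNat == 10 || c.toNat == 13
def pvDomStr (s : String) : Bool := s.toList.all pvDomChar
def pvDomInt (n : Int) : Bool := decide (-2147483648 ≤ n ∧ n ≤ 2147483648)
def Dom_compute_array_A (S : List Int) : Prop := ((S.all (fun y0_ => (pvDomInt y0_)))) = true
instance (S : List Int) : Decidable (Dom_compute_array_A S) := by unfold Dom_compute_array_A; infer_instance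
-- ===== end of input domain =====

-- B replaces A's segment tree by a direct prefix-max scan over the result array (simpler, same result).

-- ===== PORT A =====
-- shared helper: compute_ranks is identical in Source A and Source B, so both ports use this one definition
def compute_ranks (S : List Int) : List Int :=
  let n := S.length
  -- p = [(S[i], i) for i in range(len(S))]  (S[i] always in range here, so the getD default is unreachable)
  let p : List (Int × Int) := (PySem.List.pyRange 0 n 1).map (fun i => (PySem.List.pyGetD S i 0, i))
  -- p.sort(key=lambda x: (x[0], -x[1]))
  let ps := PySem.List.sorted2 p (fun x => x.1) (fun x => -x.2)
  -- for i, (x, _) in enumerate(p): if x not in indices: indices[x] = i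
  let indices : PySem.Dict Int Int := (PySem.List.enumerate ps 0).foldl
      (fun d q => if d.contains q.2.1 then d else d.insert q.2.1 q.1) PySem.Dict.empty
  -- ranks = [indices[x] + 1 for x in S]  (every x in S is a key, so the KeyError default is unreachable)
  S.map (fun x => indices.getD x 0 + 1)

-- SegmentTreeNode: children are never None on the trees A builds, so a leaf/node split is faithful
inductive Seg where
  | lf (s : Int) (mx : Int) : Seg
  | nd (s e mx : Int) (l r : Seg) : Seg
deriving Repr, DecidableEq

def Seg.st : Seg → Int
  | .lf s _ => s
  | .nd s _ _ _ _ => s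

def Seg.en : Seg → Int
  | .lf s _ => s
  | .nd _ e _ _ _ => e

def Seg.mx : Seg → Int
  | .lf _ m => m
  | .nd _ _ m _ _ => m

-- midpoint bound used by buildST's termination proof
theorem pvMidLt {s e : Int} (h : s < e) :
    ((PySem.Int.floordiv (s + e) 2 - s).toNat < (e - s).toNat) ∧
    ((e - (PySem.Int.floordiv (s + e) 2 + 1)).toNat < (e - s).toNat) := by
  have h1 := PySem.Int.floordiv_two_mid_bounds (lo := s) (hi := e) (le_of_lt h)
  have h2 : PySem.Int.floordiv (s + e) 2 < e := by
    rw [PySem.Int.floordiv_lt_iff_lt_mul (by omega)]; omega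
  omega

def buildST (nums : List Int) (s e : Int) : Option Seg :=
  if s > e then none
  else if s = e then some (.lf s (PySem.List.pyGetD nums s 0))  -- nums[start]; in range at every call site
  else
    match buildST nums s (PySem.Int.floordiv (s + e) 2),
          buildST nums (PySem.Int.floordiv (s + e) 2 + 1) e with
    | some l, some r => some (.nd s e (max l.mx r.mx) l r)
    | _, _ => none  -- Python would raise AttributeError here; unreachable since s ≤ mid < e
termination_by (e - s).toNat
decreasing_by
  · exact (pvMidLt (by omega)).1
  · exact (pvMidLt (by omega)).2

def updateST (t : Seg) (idx v : Int) : Seg :=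
  if idx < t.st ∨ idx > t.en then t
  else match t with
    | .lf s _ => .lf s v  -- here s ≤ idx ≤ s, so start == end == index
    | .nd s e _ l r =>
        if idx ≤ PySem.Int.floordiv (s + e) 2 then
          let l' := updateST l idx v
          .nd s e (max l'.mx r.mx) l' r
        else
          let r' := updateST r idx v
          .nd s e (max l.mx r'.mx) l r'

def updateOpt (t : Option Seg) (idx v : Int) : Option Seg :=
  match t with
  | none => none  -- 'if root is None: return'
  | some t => some (updateST t idx v)

def queryST (t : Seg) (qs qe : Int) : Int :=
  match t with
  | .lf s m => if qe < s ∨ qs > s then 0 else if qs ≤ s ∧ qe ≥ s then m else 0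
  | .nd s e m l r =>
      if qe < s ∨ qs > e then 0
      else if qs ≤ s ∧ qe ≥ e then m
      else max (queryST l qs qe) (queryST r qs qe)

def queryOpt (t : Option Seg) (qs qe : Int) : Int :=
  match t with
  | none => 0
  | some t => queryST t qs qe

def compute_array_A (S : List Int) : List Int × List Int :=
  let n : Int := S.length
  let ranks := compute_ranks S
  let tree := buildST (List.replicate S.length 0) 0 (n - 1)
  let res := (PySem.List.pyRange 0 n 1).foldl
    (fun st i =>
      let r := PySem.List.pyGetD ranks i 0
      let A' := PySem.List.pySetD st.1 (r - 1) (PySem.List.pyGetD S i 0 * (n - i) + queryOpt st.2 0 (r - 1))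
      (A', updateOpt st.2 (r - 1) (PySem.List.pyGetD A' (r - 1) 0)))
    (List.replicate S.length 0, tree)
  (res.1, ranks)

-- ===== PORT B =====
def compute_array_A_alt (S : List Int) : List Int × List Int :=
  let n : Int := S.length
  let ranks := compute_ranks S
  -- for i, r in enumerate(ranks): A[r-1] = S[i]*(n-i) + max(0, max(A[:r]))
  let A := (PySem.List.enumerate ranks 0).foldl
    (fun A q =>
      let i := q.1
      let r := q.2
      let mx := (PySem.List.max? (PySem.List.slice A none (some r)) (fun y => y)).getD 0  -- max(A[:r]); nonempty since r ≥ 1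
      PySem.List.pySetD A (r - 1) (PySem.List.pyGetD S i 0 * (n - i) + max 0 mx))
    (List.replicate S.length 0)
  (A, ranks)

-- ===== PRECONDITION & SPEC =====
def Spec_compute_array_A (S : List Int) (out : List Int × List Int) : Prop := out = compute_array_A_alt S
instance (S : List Int) (out : List Int × List Int) : Decidable (Spec_compute_array_A S out) := by unfold Spec_compute_array_A; infer_instance

-- ===== CLAIM (what is proved, stated in full; the proofs are below) =====
def Claim_equal_compute_array_A : Prop := ∀ (S : List Int), Dom_compute_array_A S → Spec_compute_array_A S (compute_array_A S)

-- ===== LEMMAS AND PROOFS =====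

-- max of f over the Int interval [s, s+k]
def segMax (f : Int → Int) (s : Int) : Nat → Int
  | 0 => f s
  | k + 1 => max (segMax f s k) (f (s + (k + 1)))

theorem segMax_split (f : Int → Int) (s : Int) (j k : Nat) :
    segMax f s (j + (k + 1)) = max (segMax f s j) (segMax f (s + j + 1) k) := by
  induction k with
  | zero =>
      show segMax f s (j + 1) = _
      rw [segMax, segMax]
      congr 2
      ring
  | succ k ih =>
      have h2 : j + (k + 1 + 1) = (j + (k + 1)) + 1 := by omega
      rw [h2, segMax, ih, segMax, max_assoc]
      congr 3
      push_cast; ring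

theorem le_segMax (f : Int → Int) (s : Int) (k : Nat) (j : Int) (h1 : s ≤ j) (h2 : j ≤ s + k) :
    f j ≤ segMax f s k := by
  induction k with
  | zero =>
      have : j = s := by omega
      subst this; exact le_of_eq rfl
  | succ k ih =>
      rw [segMax]
      by_cases hj : j ≤ s + k
      · exact le_trans (ih hj) (le_max_left _ _)
      · have : j = s + ((k : Int) + 1) := by push_cast at h2 ⊢; omega
        rw [← this]; exact le_max_right _ _

-- setting one entry destroys at most one zero
theorem count_zero_set (A : List Int) : ∀ (i : Nat) (v : Int),
    A.count 0 ≤ (A.set i v).count 0 + 1 := by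
  induction A with
  | nil => intro i v; simp
  | cons a t ih =>
      intro i v
      cases i with
      | zero =>
          simp only [List.set_cons_zero, List.count_cons]
          have := ih 0 v
          by_cases h0 : a = 0 <;> by_cases h1 : v = 0 <;> simp [h0, h1] <;> omega
      | succ i =>
          simp only [List.set_cons_succ, List.count_cons]
          have := ih i v
          by_cases h0 : a = 0 <;> simp [h0] <;> omega

-- well-formed segment tree over leaf values f on [s, e]
inductive SegWF (f : Int → Int) : Seg → Int → Int → Prop
  | leaf (s : Int) : SegWF f (.lf s (f s)) s s
  | node (s e : Int) (l r : Seg) (h : s < e)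
      (hl : SegWF f l s (PySem.Int.floordiv (s + e) 2))
      (hr : SegWF f r (PySem.Int.floordiv (s + e) 2 + 1) e) :
      SegWF f (.nd s e (max l.mx r.mx) l r) s e

theorem SegWF_mx {f : Int → Int} {t : Seg} {s e : Int} (h : SegWF f t s e) :
    t.mx = segMax f s (e - s).toNat := by
  induction h with
  | leaf s => simp [Seg.mx, segMax]
  | node s e l r h hl hr ihl ihr =>
      have hm := PySem.Int.floordiv_two_mid_bounds (lo := s) (hi := e) (le_of_lt h)
      have hm2 : PySem.Int.floordiv (s + e) 2 < e := by
        rw [PySem.Int.floordiv_lt_iff_lt_mul (by omega)]; omega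
      set mid := PySem.Int.floordiv (s + e) 2 with hmid
      have hj : (e - s).toNat = (mid - s).toNat + (((e - (mid + 1)).toNat) + 1) := by omega
      have hs : s + ((mid - s).toNat : Int) + 1 = mid + 1 := by omega
      rw [Seg.mx, ihl, ihr, hj, segMax_split, hs]

theorem SegWF_congr {f g : Int → Int} {t : Seg} {s e : Int}
    (h : SegWF f t s e) (hfg : ∀ j, s ≤ j → j ≤ e → f j = g j) : SegWF g t s e := by
  induction h with
  | leaf s => rw [hfg s (le_refl _) (le_refl _)]; exact SegWF.leaf s
  | node s e l r h hl hr ihl ihr =>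
      have hm := PySem.Int.floordiv_two_mid_bounds (lo := s) (hi := e) (le_of_lt h)
      exact SegWF.node s e l r h
        (ihl (fun j h1 h2 => hfg j h1 (by omega)))
        (ihr (fun j h1 h2 => hfg j (by omega) h2))

theorem build_wf (nums : List Int) :
    ∀ (k : Nat) (s e : Int), (e - s).toNat = k → s ≤ e →
      ∃ t, buildST nums s e = some t ∧ SegWF (fun j => PySem.List.pyGetD nums j 0) t s e := by
  intro k
  induction k using Nat.strong_induction_on with
  | _ k ih =>
    intro s e hk hse
    rw [buildST]
    rw [if_neg (by omega)]
    by_cases h : s = e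
    · rw [if_pos h]
      subst h
      exact ⟨_, rfl, SegWF.leaf s⟩
    · rw [if_neg h]
      have hlt : s < e := lt_of_le_of_ne hse h
      have hm := PySem.Int.floordiv_two_mid_bounds (lo := s) (hi := e) hse
      have hm2 : PySem.Int.floordiv (s + e) 2 < e := by
        rw [PySem.Int.floordiv_lt_iff_lt_mul (by omega)]; omega
      obtain ⟨l, hbl, hwl⟩ :=
        ih (PySem.Int.floordiv (s + e) 2 - s).toNat (by omega) s (PySem.Int.floordiv (s + e) 2) rfl (by omega)
      obtain ⟨r, hbr, hwr⟩ :=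
        ih (e - (PySem.Int.floordiv (s + e) 2 + 1)).toNat (by omega) (PySem.Int.floordiv (s + e) 2 + 1) e rfl (by omega)
      rw [hbl, hbr]
      exact ⟨_, rfl, SegWF.node s e l r hlt hwl hwr⟩

theorem update_wf {f : Int → Int} {t : Seg} {s e : Int} (h : SegWF f t s e) (idx v : Int) :
    s ≤ idx → idx ≤ e →
    SegWF (fun j => if j = idx then v else f j) (updateST t idx v) s e := by
  induction h with
  | leaf s =>
      intro h1 h2
      have hs : s = idx := le_antisymm h1 h2
      subst hs
      rw [updateST]
      rw [if_neg (by simp [Seg.st, Seg.en])]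
      have hc := SegWF.leaf (f := fun j => if j = s then v else f j) s
      simpa using hc
  | node s e l r hlt hl hr ihl ihr =>
      intro h1 h2
      have hm := PySem.Int.floordiv_two_mid_bounds (lo := s) (hi := e) (le_of_lt hlt)
      have hm2 : PySem.Int.floordiv (s + e) 2 < e := by
        rw [PySem.Int.floordiv_lt_iff_lt_mul (by omega)]; omega
      rw [updateST]
      rw [if_neg (by simp only [Seg.st, Seg.en]; omega)]
      by_cases hc : idx ≤ PySem.Int.floordiv (s + e) 2
      · simp only [if_pos hc]
        exact SegWF.node s e _ r hlt (ihl h1 hc)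
          (SegWF_congr hr (fun j hj1 hj2 => by simp [show ¬ (j = idx) from by omega]))
      · simp only [if_neg hc]
        exact SegWF.node s e l _ hlt
          (SegWF_congr hl (fun j hj1 hj2 => by simp [show ¬ (j = idx) from by omega]))
          (ihr (by omega) h2)

theorem query_char {f : Int → Int} {t : Seg} {s e : Int} (h : SegWF f t s e) :
    0 ≤ s → ∀ qe : Int,
    queryST t 0 qe =
      if qe < s then 0
      else if e ≤ qe then segMax f s (e - s).toNat
      else max (segMax f s (qe - s).toNat) 0 := by
  induction h with
  | leaf s =>
      intro hs qe
      rw [queryST]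
      by_cases h1 : qe < s
      · rw [if_pos (Or.inl h1), if_pos h1]
      · rw [if_neg (by omega), if_pos ⟨hs, by omega⟩, if_neg h1, if_pos (by omega)]
        simp [segMax]
  | node s e l r hlt hl hr ihl ihr =>
      intro hs qe
      have hm := PySem.Int.floordiv_two_mid_bounds (lo := s) (hi := e) (le_of_lt hlt)
      have hm2 : PySem.Int.floordiv (s + e) 2 < e := by
        rw [PySem.Int.floordiv_lt_iff_lt_mul (by omega)]; omega
      set mid := PySem.Int.floordiv (s + e) 2 with hmid
      rw [queryST]
      by_cases h1 : qe < s
      · rw [if_pos (Or.inl h1), if_pos h1]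
      · rw [if_neg (by omega)]
        by_cases h2 : e ≤ qe
        · rw [if_pos ⟨hs, by omega⟩, if_neg h1, if_pos h2]
          exact SegWF_mx (SegWF.node s e l r hlt hl hr)
        · rw [if_neg (by omega), if_neg h1, if_neg h2]
          rw [ihl hs qe, ihr (by omega) qe]
          rcases lt_trichotomy qe mid with h3 | h3 | h3
          · rw [if_neg h1, if_neg (by omega), if_pos (by omega), max_assoc, max_self]
          · rw [if_neg h1, if_pos (by omega), if_pos (by omega), h3]
          · rw [if_neg h1, if_pos (by omega), if_neg (by omega), if_neg h2]
            have hsplit := segMax_split f s (mid - s).toNat ((qe - (mid + 1)).toNat)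
            have harg : (mid - s).toNat + ((qe - (mid + 1)).toNat + 1) = (qe - s).toNat := by omega
            have harg2 : s + ((mid - s).toNat : Int) + 1 = mid + 1 := by omega
            rw [harg, harg2] at hsplit
            rw [hsplit, max_assoc]

-- ranks: the dict fold only ever stores enumerate positions, and contains every key of the list
theorem fold_idx_get? (L : List (Int × (Int × Int))) :
    ∀ (d : PySem.Dict Int Int) (y v : Int),
      (L.foldl (fun d q => if d.contains q.2.1 then d else d.insert q.2.1 q.1) d).get? y = some v →
      d.get? y = some v ∨ ∃ q ∈ L, q.2.1 = y ∧ q.1 = v := by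
  induction L with
  | nil => intro d y v h; exact Or.inl h
  | cons q L ih =>
      intro d y v h
      rw [List.foldl_cons] at h
      rcases ih _ y v h with h' | ⟨q', hq', hy, hv⟩
      · by_cases hc : (PySem.Dict.contains d q.2.1 : Bool)
        · rw [if_pos hc] at h'; exact Or.inl h'
        · rw [if_neg hc] at h'
          by_cases hy : y = q.2.1
          · subst hy
            rw [PySem.Dict.get?_insert_self d q.2.1 q.1] at h'
            exact Or.inr ⟨q, List.mem_cons_self, rfl, (Option.some_inj.mp h')⟩
          · rw [PySem.Dict.get?_insert_of_ne d q.1 hy] at h'; exact Or.inl h'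
      · exact Or.inr ⟨q', List.mem_cons_of_mem _ hq', hy, hv⟩

theorem fold_idx_mono (L : List (Int × (Int × Int))) :
    ∀ (d : PySem.Dict Int Int) (y : Int), d.contains y = true →
      (L.foldl (fun d q => if d.contains q.2.1 then d else d.insert q.2.1 q.1) d).contains y = true := by
  induction L with
  | nil => intro d y h; exact h
  | cons q L ih =>
      intro d y h
      rw [List.foldl_cons]
      apply ih
      by_cases hc : (PySem.Dict.contains d q.2.1 : Bool)
      · rw [if_pos hc]; exact h
      · rw [if_neg hc]; simp [PySem.Dict.contains_insert, h]

theorem fold_idx_contains (L : List (Int × (Int × Int))) :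
    ∀ (d : PySem.Dict Int Int) (y : Int), (∃ q ∈ L, q.2.1 = y) →
      (L.foldl (fun d q => if d.contains q.2.1 then d else d.insert q.2.1 q.1) d).contains y = true := by
  induction L with
  | nil => rintro d y ⟨q, hq, _⟩; simp at hq
  | cons q L ih =>
      rintro d y ⟨q', hq', hy⟩
      rw [List.foldl_cons]
      rcases List.mem_cons.mp hq' with rfl | hmem
      · apply fold_idx_mono
        by_cases hc : (PySem.Dict.contains d q'.2.1 : Bool)
        · rw [if_pos hc, ← hy]; exact hc
        · rw [if_neg hc, ← hy]; exact PySem.Dict.contains_insert_self d q'.2.1 q'.1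
      · exact ih _ y ⟨q', hmem, hy⟩

theorem compute_ranks_length (S : List Int) : (compute_ranks S).length = S.length := by
  simp [compute_ranks]

theorem ranks_bounds (S : List Int) :
    ∀ r ∈ compute_ranks S, 1 ≤ r ∧ r ≤ (S.length : Int) := by
  intro r hr
  simp only [compute_ranks, List.mem_map] at hr
  obtain ⟨x, hx, hr⟩ := hr
  set p : List (Int × Int) :=
    (PySem.List.pyRange 0 (S.length : Int) 1).map (fun i => (PySem.List.pyGetD S i 0, i)) with hp
  set ps := PySem.List.sorted2 p (fun x => x.1) (fun x => -x.2) with hps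
  set d := (PySem.List.enumerate ps 0).foldl
      (fun d q => if d.contains q.2.1 then d else d.insert q.2.1 q.1) PySem.Dict.empty with hd
  have hperm : ps.Perm p := PySem.List.sorted2_perm p (fun x => x.1) (fun x => -x.2) false
  have hpslen : ps.length = S.length := by
    rw [hperm.length_eq, hp, List.length_map, PySem.List.length_pyRange_one]
    omega
  have hxps : ∃ q ∈ ps, q.1 = x := by
    obtain ⟨j, hj, rfl⟩ := List.mem_iff_getElem.mp hx
    refine ⟨(S[j], (j : Int)), hperm.mem_iff.mpr ?_, rfl⟩
    rw [hp, List.mem_map]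
    refine ⟨(j : Int), PySem.List.mem_pyRange_one.mpr ⟨by omega, by exact_mod_cast hj⟩, ?_⟩
    rw [PySem.List.pyGetD_natCast, List.getD_eq_getElem _ _ hj]
  have hcont : d.contains x = true := by
    obtain ⟨q0, hq0, hq0x⟩ := hxps
    obtain ⟨k, hk, rfl⟩ := List.mem_iff_getElem.mp hq0
    exact fold_idx_contains _ _ _
      ⟨((0 : Int) + (k : Int), ps[k]), (PySem.List.mem_enumerate_iff ps 0 _).mpr ⟨k, hk, rfl⟩, hq0x⟩
  have hsome : ∃ v, d.get? x = some v := by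
    have hiso := PySem.Dict.contains_eq_isSome_get? (d := d) (k := x)
    rw [hcont] at hiso
    exact Option.isSome_iff_exists.mp hiso.symm
  obtain ⟨v, hv⟩ := hsome
  rcases fold_idx_get? _ _ _ _ hv with h0 | ⟨q, hq, _, hqv⟩
  · rw [PySem.Dict.get?_empty] at h0; exact absurd h0 (by simp)
  · obtain ⟨k, hk, rfl⟩ := (PySem.List.mem_enumerate_iff ps 0 q).mp hq
    have hgd : d.getD x 0 = v := PySem.Dict.getD_of_get?_eq_some d 0 hv
    rw [← hr, hgd, ← hqv]
    have hkl : k < S.length := by omega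
    constructor
    · omega
    · simp only []
      omega

theorem max?_append_singleton (xs : List Int) (a : Int) (h : xs ≠ []) :
    PySem.List.max? (xs ++ [a]) (fun y => y)
      = some (max ((PySem.List.max? xs (fun y => y)).getD 0) a) := by
  obtain ⟨x, t, rfl⟩ := List.exists_cons_of_ne_nil h
  rw [List.cons_append, PySem.List.max?_id_cons, PySem.List.max?_id_cons]
  simp [List.foldl_append]

theorem take_max_eq_segMax (A : List Int) :
    ∀ (k : Nat), k < A.length →
      (PySem.List.max? (A.take (k + 1)) (fun y => y)).getD 0
        = segMax (fun j => PySem.List.pyGetD A j 0) 0 k := by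
  intro k
  induction k with
  | zero =>
      intro hk
      have hA : A ≠ [] := by rintro rfl; simp at hk
      obtain ⟨a, t, rfl⟩ := List.exists_cons_of_ne_nil hA
      rw [List.take_add_one]
      simp [PySem.List.max?_id_cons, segMax, PySem.List.pyGetD_zero_cons]
  | succ k ih =>
      intro hk
      have hk' : k < A.length := by omega
      have htake : A.take (k + 1 + 1) = A.take (k + 1) ++ [A[k + 1]] := by
        rw [List.take_add_one, List.getElem?_eq_getElem hk]
        rfl
      have hne : A.take (k + 1) ≠ [] := by
        have hlt : (A.take (k + 1)).length = k + 1 := by rw [List.length_take]; omega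
        intro hnil
        rw [hnil] at hlt
        simp at hlt
      rw [htake, max?_append_singleton _ _ hne, Option.getD_some, ih hk', segMax]
      congr 1
      have harg : (0 : Int) + ((k : Int) + 1) = ((k + 1 : Nat) : Int) := by push_cast; ring
      rw [harg, PySem.List.pyGetD_natCast, List.getD_eq_getElem _ _ hk]

theorem prefix_max_eq (A : List Int) (r : Int) (h1 : 1 ≤ r) (h2 : r ≤ (A.length : Int)) :
    (PySem.List.max? (PySem.List.slice A none (some r)) (fun y => y)).getD 0
      = segMax (fun j => PySem.List.pyGetD A j 0) 0 (r - 1).toNat := by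
  have hsl : PySem.List.slice A none (some r) = A.take r.toNat := PySem.List.slice_to A (by omega)
  rw [hsl]
  have : r.toNat = (r - 1).toNat + 1 := by omega
  rw [this]
  exact take_max_eq_segMax A (r - 1).toNat (by omega)

-- a list with a zero entry has a nonnegative segMax over its whole index range
theorem segMax_nonneg_of_zero_mem (A : List Int) (h0 : 0 ∈ A) (hne : A ≠ []) :
    0 ≤ segMax (fun j => PySem.List.pyGetD A j 0) 0 (((A.length : Int) - 1) - 0).toNat := by
  obtain ⟨m, hm, hAm⟩ := List.mem_iff_getElem.mp h0
  have hget : PySem.List.pyGetD A (m : Int) 0 = 0 := by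
    rw [PySem.List.pyGetD_natCast, List.getD_eq_getElem _ _ hm, hAm]
  have hle := le_segMax (fun j => PySem.List.pyGetD A j 0) 0
      ((((A.length : Int) - 1) - 0).toNat) (m : Int) (by omega)
      (by have : 0 < A.length := List.length_pos_of_ne_nil hne; omega)
  simpa [hget] using hle

theorem fold_eq (S : List Int) (ranks : List Int)
    (hlen : ranks.length = S.length)
    (hrb : ∀ r ∈ ranks, 1 ≤ r ∧ r ≤ (S.length : Int)) :
    ∀ (qs : List (Int × Int)), (∀ q ∈ qs, 0 ≤ q.1 ∧ q.1 < (S.length : Int) ∧ q.2 = PySem.List.pyGetD ranks q.1 0) →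
    ∀ (A : List Int) (t : Seg), A.length = S.length →
      qs.length ≤ A.count 0 →
      SegWF (fun j => PySem.List.pyGetD A j 0) t 0 ((S.length : Int) - 1) →
      ((qs.map (·.1)).foldl (fun st i =>
          let r := PySem.List.pyGetD ranks i 0
          let A' := PySem.List.pySetD st.1 (r - 1)
            (PySem.List.pyGetD S i 0 * ((S.length : Int) - i) + queryOpt st.2 0 (r - 1))
          (A', updateOpt st.2 (r - 1) (PySem.List.pyGetD A' (r - 1) 0)))
        (A, some t)).1
      = qs.foldl (fun A q =>
          let i := q.1
          let r := q.2
          let mx := (PySem.List.max? (PySem.List.slice A none (some r)) (fun y => y)).getD 0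
          PySem.List.pySetD A (r - 1) (PySem.List.pyGetD S i 0 * ((S.length : Int) - i) + max 0 mx)) A := by
  intro qs
  induction qs with
  | nil => intro _ A t hA hcount hWF; rfl
  | cons q rest ih =>
      intro hmem A t hA hcount hWF
      obtain ⟨hi0, hin, hqr⟩ := hmem q List.mem_cons_self
      rw [List.map_cons, List.foldl_cons, List.foldl_cons]
      dsimp only
      set i := q.1 with hidef
      rw [hqr]
      set r := PySem.List.pyGetD ranks i 0 with hrdef
      have hrin : r ∈ ranks := by
        rw [hrdef]
        exact PySem.List.pyGetD_mem ranks 0 (by simp [PySem.Raise.InRange, hlen]; omega)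
      obtain ⟨hr1, hr2⟩ := hrb r hrin
      have hAne : A ≠ [] := by
        intro hnil; rw [hnil] at hA; simp at hA; omega
      have h0mem : 0 ∈ A := by
        have : 1 ≤ A.count 0 := by
          have := hcount; simp only [List.length_cons] at this; omega
        exact List.count_pos_iff.mp (by omega)
      have hq : queryOpt (some t) 0 (r - 1)
          = max 0 ((PySem.List.max? (PySem.List.slice A none (some r)) (fun y => y)).getD 0) := by
        show queryST t 0 (r - 1) = _
        rw [query_char hWF (le_refl 0) (r - 1)]
        rw [prefix_max_eq A r hr1 (by omega)]
        by_cases hre : r = (S.length : Int)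
        · rw [if_neg (by omega), if_pos (by omega)]
          have hnn := segMax_nonneg_of_zero_mem A h0mem hAne
          have hee : (((S.length : Int) - 1) - 0).toNat = (r - 1).toNat := by rw [hre]; omega
          rw [hA, hee] at hnn
          rw [hee]
          omega
        · rw [if_neg (by omega), if_neg (by omega), max_comm]
          congr 2
          omega
      rw [← hq]
      set v := PySem.List.pyGetD S i 0 * ((S.length : Int) - i) + queryOpt (some t) 0 (r - 1) with hvdef
      have hsetnat : PySem.List.pySetD A (r - 1) v = A.set (r - 1).toNat v :=
        PySem.List.pySetD_of_nonneg A v (by omega)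
      have hlen' : (PySem.List.pySetD A (r - 1) v).length = S.length := by
        rw [hsetnat, List.length_set, hA]
      have hsetlen : ((A.set (r - 1).toNat v).length : Int) = (S.length : Int) := by
        rw [List.length_set, hA]
      have hcount' : rest.length ≤ (PySem.List.pySetD A (r - 1) v).count 0 := by
        rw [hsetnat]
        have hcs := count_zero_set A (r - 1).toNat v
        simp only [List.length_cons] at hcount
        omega
      have hget : PySem.List.pyGetD (PySem.List.pySetD A (r - 1) v) (r - 1) 0 = v := by
        rw [hsetnat, PySem.List.pyGetD_eq_getElem _ 0 (by omega) (by rw [hsetlen]; omega)]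
        simp
      have hwf' : SegWF (fun j => PySem.List.pyGetD (PySem.List.pySetD A (r - 1) v) j 0)
          (updateST t (r - 1) v) 0 ((S.length : Int) - 1) := by
        apply SegWF_congr (update_wf hWF (r - 1) v (by omega) (by omega))
        intro j hj1 hj2
        by_cases hje : j = r - 1
        · rw [if_pos hje, hje, hget]
        · rw [if_neg hje, hsetnat,
              PySem.List.pyGetD_eq_getElem (A.set (r - 1).toNat v) 0 (by omega) (by rw [hsetlen]; omega),
              PySem.List.pyGetD_eq_getElem A 0 (by omega) (by rw [hA]; exact by omega)]
          rw [List.getElem_set]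
          rw [if_neg (by omega)]
      have hupd : updateOpt (some t) (r - 1) (PySem.List.pyGetD (PySem.List.pySetD A (r - 1) v) (r - 1) 0)
          = some (updateST t (r - 1) v) := by rw [hget]; rfl
      rw [hupd]
      exact ih (fun q' hq' => hmem q' (List.mem_cons_of_mem _ hq')) _ _ hlen' hcount' hwf'

-- ===== VERDICT (by name: the statement is the Claim_ definition above) =====
theorem compute_array_A_spec : Claim_equal_compute_array_A := by
  intro S _hdom
  show compute_array_A S = compute_array_A_alt S
  simp only [compute_array_A, compute_array_A_alt]
  by_cases hS : S.length = 0
  · have hr0 : PySem.List.pyRange 0 (S.length : Int) 1 = [] := by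
      rw [hS]; rfl
    have he0 : PySem.List.enumerate (compute_ranks S) 0 = [] := by
      have : compute_ranks S = [] := by
        have := compute_ranks_length S
        rw [hS] at this
        exact List.eq_nil_of_length_eq_zero this
      rw [this]; rfl
    simp only [hr0, he0, List.foldl_nil]
  · obtain ⟨t, hbt, hwt⟩ :=
      build_wf (List.replicate S.length 0) (((S.length : Int) - 1) - 0).toNat 0 ((S.length : Int) - 1)
        rfl (by omega)
    rw [hbt]
    refine Prod.ext ?_ rfl
    have hqsmem : ∀ q ∈ PySem.List.enumerate (compute_ranks S) 0,
        0 ≤ q.1 ∧ q.1 < (S.length : Int) ∧ q.2 = PySem.List.pyGetD (compute_ranks S) q.1 0 := by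
      intro q hq
      obtain ⟨k, hk, rfl⟩ := (PySem.List.mem_enumerate_iff _ 0 q).mp hq
      have hk' : k < S.length := by rw [compute_ranks_length] at hk; exact hk
      refine ⟨by omega, by simp only []; omega, ?_⟩
      simp only []
      rw [show (0 : Int) + (k : Int) = (k : Int) by ring, PySem.List.pyGetD_natCast,
          List.getD_eq_getElem _ _ hk]
    have hrange : PySem.List.pyRange 0 (S.length : Int) 1
        = (PySem.List.enumerate (compute_ranks S) 0).map (·.1) := by
      rw [PySem.List.map_fst_enumerate, compute_ranks_length]
      congr 1
      omega
    rw [hrange]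
    refine fold_eq S (compute_ranks S) (compute_ranks_length S) (ranks_bounds S)
      (PySem.List.enumerate (compute_ranks S) 0) hqsmem (List.replicate S.length 0) t (by simp)
      ?_ hwt
    rw [PySem.List.length_enumerate, compute_ranks_length, List.count_replicate]
    simp
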